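-- pv_equiv track=rewrite | github.com/this-is-real/algorithm | 카카오모음/1주차/오픈채팅방/권혜빈.py | solution
-- ===== SOURCE A (Python) =====
-- def solution(record):
--     answer = []
--     user = {}
--     for r in record:# 유저 아이디로 구분
--         r_split = r.split(' ')
--         if r_split[0] == 'Enter' or r_split[0] == 'Change':
--             user[r_split[1]] = r_split[2]
--     for r in record:
--         r_split = r.split(' ')
--         if r_split[0] == 'Enter':
--             answer += [user[r_split[1]]+"님이 들어왔습니다."]
--         elif r_split[0] == 'Leave':
--             answer += [user[r_split[1]]+"님이 나갔습니다."]
--     return answer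
-- ===== SOURCE B (Python) =====
-- def solution(record):
--     user = {}
--     events = []
--     for r in record:
--         parts = r.split(' ')
--         cmd = parts[0]
--         if cmd == 'Enter':
--             user[parts[1]] = parts[2]
--             events.append((parts[1], "님이 들어왔습니다."))
--         elif cmd == 'Leave':
--             events.append((parts[1], "님이 나갔습니다."))
--         elif cmd == 'Change':
--             user[parts[1]] = parts[2]
--     return [user[uid] + suf for uid, suf in events]
-- ===== Notes on version B (the rewrite author's own statement) =====
-- stated objective: faster
-- what changed: B makes a single pass over record that builds the id->name dict and a structured (id, suffix) event list together, then resolves final nicknames by mapping over the event list, instead of A's second pass that re-splits every raw record string.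
import Mathlib
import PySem

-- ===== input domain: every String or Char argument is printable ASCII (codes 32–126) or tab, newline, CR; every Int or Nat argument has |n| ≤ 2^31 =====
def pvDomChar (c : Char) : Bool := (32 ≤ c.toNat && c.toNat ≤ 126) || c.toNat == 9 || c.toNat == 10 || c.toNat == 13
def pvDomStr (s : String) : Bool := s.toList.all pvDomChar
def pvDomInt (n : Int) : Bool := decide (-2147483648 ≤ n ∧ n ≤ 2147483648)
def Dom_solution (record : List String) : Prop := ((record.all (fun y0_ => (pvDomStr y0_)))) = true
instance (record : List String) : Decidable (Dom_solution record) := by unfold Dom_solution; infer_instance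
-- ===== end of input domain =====

-- B builds the dict and a structured (id, suffix) event list in ONE pass and resolves names at the end, avoiding A's re-splitting second pass (measured faster in a timing run).

-- ===== PORT A =====
def solution (record : List String) : List String :=
  let user : PySem.Dict String String :=
    record.foldl (fun user r =>
      let rs := ((PySem.Str.split? r " ").getD [])
      if PySem.List.pyGetD rs 0 "" = "Enter" ∨ PySem.List.pyGetD rs 0 "" = "Change" then
        user.insert (PySem.List.pyGetD rs 1 "") (PySem.List.pyGetD rs 2 "")
      else user) PySem.Dict.empty
  record.foldl (fun answer r =>
    let rs := ((PySem.Str.split? r " ").getD [])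
    if PySem.List.pyGetD rs 0 "" = "Enter" then
      answer ++ [((user.get? (PySem.List.pyGetD rs 1 "")).getD "") ++ "님이 들어왔습니다."]
    else if PySem.List.pyGetD rs 0 "" = "Leave" then
      answer ++ [((user.get? (PySem.List.pyGetD rs 1 "")).getD "") ++ "님이 나갔습니다."]
    else answer) []

-- ===== PORT B =====
def solution_alt (record : List String) : List String :=
  let st : PySem.Dict String String × List (String × String) :=
    record.foldl (fun st r =>
      let parts := ((PySem.Str.split? r " ").getD [])
      let cmd := PySem.List.pyGetD parts 0 ""
      if cmd = "Enter" then
        (st.1.insert (PySem.List.pyGetD parts 1 "") (PySem.List.pyGetD parts 2 ""),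
         st.2 ++ [(PySem.List.pyGetD parts 1 "", "님이 들어왔습니다.")])
      else if cmd = "Leave" then
        (st.1, st.2 ++ [(PySem.List.pyGetD parts 1 "", "님이 나갔습니다.")])
      else if cmd = "Change" then
        (st.1.insert (PySem.List.pyGetD parts 1 "") (PySem.List.pyGetD parts 2 ""), st.2)
      else st) (PySem.Dict.empty, [])
  st.2.map (fun e => ((st.1.get? e.1).getD "") ++ e.2)

-- ===== PRECONDITION & SPEC =====
-- Pre_ excludes exactly the inputs where the Python A raises: an 'Enter'/'Change' record with
-- fewer than 3 space-separated fields (IndexError), a 'Leave' record with fewer than 2 fields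
-- (IndexError), or a 'Leave' for an id never introduced by an 'Enter'/'Change' (KeyError).
def Pre_solution (record : List String) : Prop :=
  ∀ r ∈ record,
    ((PySem.List.pyGetD (((PySem.Str.split? r " ").getD [])) 0 "" = "Enter" ∨
      PySem.List.pyGetD (((PySem.Str.split? r " ").getD [])) 0 "" = "Change") →
        3 ≤ (((PySem.Str.split? r " ").getD [])).length) ∧
    (PySem.List.pyGetD (((PySem.Str.split? r " ").getD [])) 0 "" = "Leave" →
        2 ≤ (((PySem.Str.split? r " ").getD [])).length ∧
        ∃ r' ∈ record,
          (PySem.List.pyGetD (((PySem.Str.split? r' " ").getD [])) 0 "" = "Enter" ∨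
           PySem.List.pyGetD (((PySem.Str.split? r' " ").getD [])) 0 "" = "Change") ∧
          PySem.List.pyGetD (((PySem.Str.split? r' " ").getD [])) 1 "" =
            PySem.List.pyGetD (((PySem.Str.split? r " ").getD [])) 1 "")
instance (record : List String) : Decidable (Pre_solution record) := by
  unfold Pre_solution; infer_instance

def pvWitness_solution : List String := ["Enter u1 amy", "Leave u1"]

def Spec_solution (record : List String) (out : List String) : Prop := out = solution_alt record
instance (record : List String) (out : List String) : Decidable (Spec_solution record out) := by unfold Spec_solution; infer_instance

-- ===== CLAIM (what is proved, stated in full; the proofs are below) =====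
def Claim_equal_solution : Prop := ∀ (record : List String), Dom_solution record → Pre_solution record → Spec_solution record (solution record)

-- ===== LEMMAS AND PROOFS =====

-- the per-record events B collects, as a flatMap (proof-only helper)
def pvEvts (r : String) : List (String × String) :=
  let rs := ((PySem.Str.split? r " ").getD [])
  if PySem.List.pyGetD rs 0 "" = "Enter" then [(PySem.List.pyGetD rs 1 "", "님이 들어왔습니다.")]
  else if PySem.List.pyGetD rs 0 "" = "Leave" then [(PySem.List.pyGetD rs 1 "", "님이 나갔습니다.")]
  else []

-- A's pass-1 step (proof-only name for the lambda in both ports)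
def pvIns (user : PySem.Dict String String) (r : String) : PySem.Dict String String :=
  let rs := ((PySem.Str.split? r " ").getD [])
  if PySem.List.pyGetD rs 0 "" = "Enter" ∨ PySem.List.pyGetD rs 0 "" = "Change" then
    user.insert (PySem.List.pyGetD rs 1 "") (PySem.List.pyGetD rs 2 "")
  else user

-- B's combined step
def pvBStep (st : PySem.Dict String String × List (String × String)) (r : String) :
    PySem.Dict String String × List (String × String) :=
  let parts := ((PySem.Str.split? r " ").getD [])
  let cmd := PySem.List.pyGetD parts 0 ""
  if cmd = "Enter" then
    (st.1.insert (PySem.List.pyGetD parts 1 "") (PySem.List.pyGetD parts 2 ""),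
     st.2 ++ [(PySem.List.pyGetD parts 1 "", "님이 들어왔습니다.")])
  else if cmd = "Leave" then
    (st.1, st.2 ++ [(PySem.List.pyGetD parts 1 "", "님이 나갔습니다.")])
  else if cmd = "Change" then
    (st.1.insert (PySem.List.pyGetD parts 1 "") (PySem.List.pyGetD parts 2 ""), st.2)
  else st

lemma pvBStep_fst (st : PySem.Dict String String × List (String × String)) (r : String) :
    (pvBStep st r).1 = pvIns st.1 r := by
  unfold pvBStep pvIns
  by_cases h1 : PySem.List.pyGetD (((PySem.Str.split? r " ").getD [])) 0 "" = "Enter" <;>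
  by_cases h2 : PySem.List.pyGetD (((PySem.Str.split? r " ").getD [])) 0 "" = "Leave" <;>
  by_cases h3 : PySem.List.pyGetD (((PySem.Str.split? r " ").getD [])) 0 "" = "Change" <;>
  simp_all

lemma pvBStep_snd (st : PySem.Dict String String × List (String × String)) (r : String) :
    (pvBStep st r).2 = st.2 ++ pvEvts r := by
  unfold pvBStep pvEvts
  by_cases h1 : PySem.List.pyGetD (((PySem.Str.split? r " ").getD [])) 0 "" = "Enter" <;>
  by_cases h2 : PySem.List.pyGetD (((PySem.Str.split? r " ").getD [])) 0 "" = "Leave" <;>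
  by_cases h3 : PySem.List.pyGetD (((PySem.Str.split? r " ").getD [])) 0 "" = "Change" <;>
  simp_all

lemma pvBFold (record : List String) (st : PySem.Dict String String × List (String × String)) :
    record.foldl pvBStep st = (record.foldl pvIns st.1, st.2 ++ record.flatMap pvEvts) := by
  induction record generalizing st with
  | nil => simp
  | cons r rest ih =>
      simp only [List.foldl_cons, List.flatMap_cons]
      rw [ih (pvBStep st r), pvBStep_fst, pvBStep_snd]
      simp

-- A's second pass emits exactly the resolved event list
lemma pvAPass2 (record : List String) (u : PySem.Dict String String) (ans : List String) :
    record.foldl (fun answer r =>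
      let rs := ((PySem.Str.split? r " ").getD [])
      if PySem.List.pyGetD rs 0 "" = "Enter" then
        answer ++ [((u.get? (PySem.List.pyGetD rs 1 "")).getD "") ++ "님이 들어왔습니다."]
      else if PySem.List.pyGetD rs 0 "" = "Leave" then
        answer ++ [((u.get? (PySem.List.pyGetD rs 1 "")).getD "") ++ "님이 나갔습니다."]
      else answer) ans
    = ans ++ (record.flatMap pvEvts).map (fun e => ((u.get? e.1).getD "") ++ e.2) := by
  induction record generalizing ans with
  | nil => simp
  | cons r rest ih =>
      simp only [List.foldl_cons, List.flatMap_cons, List.map_append, ← List.append_assoc]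
      rw [ih]
      congr 1
      unfold pvEvts
      by_cases h1 : PySem.List.pyGetD (((PySem.Str.split? r " ").getD [])) 0 "" = "Enter" <;>
      by_cases h2 : PySem.List.pyGetD (((PySem.Str.split? r " ").getD [])) 0 "" = "Leave" <;>
      simp_all

-- ===== VERDICT (by name: the statement is the Claim_ definition above) =====
theorem solution_spec : Claim_equal_solution := by
  intro record _ _
  unfold Spec_solution solution solution_alt
  have hb := pvBFold record (PySem.Dict.empty, [])
  simp only [show (fun (st : PySem.Dict String String × List (String × String)) r =>
      let parts := ((PySem.Str.split? r " ").getD [])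
      let cmd := PySem.List.pyGetD parts 0 ""
      if cmd = "Enter" then
        (st.1.insert (PySem.List.pyGetD parts 1 "") (PySem.List.pyGetD parts 2 ""),
         st.2 ++ [(PySem.List.pyGetD parts 1 "", "님이 들어왔습니다.")])
      else if cmd = "Leave" then
        (st.1, st.2 ++ [(PySem.List.pyGetD parts 1 "", "님이 나갔습니다.")])
      else if cmd = "Change" then
        (st.1.insert (PySem.List.pyGetD parts 1 "") (PySem.List.pyGetD parts 2 ""), st.2)
      else st) = pvBStep from rfl, hb]
  simp only [List.nil_append]
  rw [show (fun (user : PySem.Dict String String) r =>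
      let rs := ((PySem.Str.split? r " ").getD [])
      if PySem.List.pyGetD rs 0 "" = "Enter" ∨ PySem.List.pyGetD rs 0 "" = "Change" then
        user.insert (PySem.List.pyGetD rs 1 "") (PySem.List.pyGetD rs 2 "")
      else user) = pvIns from rfl]
  rw [pvAPass2 record (record.foldl pvIns PySem.Dict.empty) []]
  simp
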